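-- pv_equiv track=rewrite | github.com/mysql/mysql-shell-plugins | gui/frontend/src/app-wrapper/windows/packaging/wix4.py | __normalize_id
-- ===== SOURCE A (Python) =====
-- import string
--
-- def __normalize_id(id):
--     allowed = string.ascii_letters + string.digits + "_."
--     replaced = 0
--     out = ""
--
--     for i in id:
--         if i in allowed:
--             out += i
--         else:
--             out += "_"
--             replaced += 1
--
--     return out, replaced
-- ===== SOURCE B (Python) =====
-- import re
--
-- def __normalize_id(id):
--     return re.subn(r'[^A-Za-z0-9_.]', '_', id)
-- ===== Notes on version B (the rewrite author's own statement) =====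
-- stated objective: idiomatic
-- what changed: Replaces the manual character-by-character accumulation loop with a single re.subn call on the negated character class [^A-Za-z0-9_.], which yields the normalized string and the replacement count in one call.
import Mathlib
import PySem

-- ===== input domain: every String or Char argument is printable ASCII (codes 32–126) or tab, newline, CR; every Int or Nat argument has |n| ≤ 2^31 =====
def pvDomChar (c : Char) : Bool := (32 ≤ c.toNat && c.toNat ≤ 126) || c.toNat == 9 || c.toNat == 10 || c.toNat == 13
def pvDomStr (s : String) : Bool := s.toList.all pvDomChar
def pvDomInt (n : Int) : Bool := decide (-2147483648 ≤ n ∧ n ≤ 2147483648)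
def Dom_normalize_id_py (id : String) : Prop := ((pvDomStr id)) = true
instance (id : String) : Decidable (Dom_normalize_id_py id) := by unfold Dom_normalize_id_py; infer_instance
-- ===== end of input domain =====

-- B replaces A's character-accumulating loop by a single regex re.subn call (ported as a
-- map + count over the characters, the regex class [^A-Za-z0-9_.] as range tests); objective: idiomatic.

-- ===== PORT A =====
-- allowed = string.ascii_letters + string.digits + "_."
def pvAllowed : String := "abcdefghijklmnopqrstuvwxyzABCDEFGHIJKLMNOPQRSTUVWXYZ0123456789_."

def normalize_id_py (id : String) : String × Int :=
  id.toList.foldl (fun (st : String × Int) i =>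
    if i ∈ pvAllowed.toList then (st.1.push i, st.2) else (st.1.push '_', st.2 + 1)) ("", 0)

-- ===== PORT B =====
-- the regex character class [A-Za-z0-9_.], as range tests on the code point
def pvInClass (c : Char) : Bool :=
  (65 ≤ c.toNat && c.toNat ≤ 90) || (97 ≤ c.toNat && c.toNat ≤ 122) ||
  (48 ≤ c.toNat && c.toNat ≤ 57) || c == '_' || c == '.'

-- re.subn(r'[^A-Za-z0-9_.]', '_', id): per-character substitution plus match count
def normalize_id_py_alt (id : String) : String × Int :=
  (String.ofList (id.toList.map (fun c => if pvInClass c then c else '_')),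
   Int.ofNat (id.toList.countP (fun c => !pvInClass c)))

-- ===== PRECONDITION & SPEC =====
def Spec_normalize_id_py (id : String) (out : String × Int) : Prop := out = normalize_id_py_alt id
instance (id : String) (out : String × Int) : Decidable (Spec_normalize_id_py id out) := by unfold Spec_normalize_id_py; infer_instance

-- ===== CLAIM (what is proved, stated in full; the proofs are below) =====
def Claim_equal_normalize_id_py : Prop := ∀ (id : String), Dom_normalize_id_py id → Spec_normalize_id_py id (normalize_id_py id)

-- ===== LEMMAS AND PROOFS =====
theorem char_eq_iff_toNat (a b : Char) : a = b ↔ a.toNat = b.toNat := by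
  constructor
  · intro h; rw [h]
  · intro h; exact Char.ext (UInt32.toNat_inj.mp h)

theorem mem_allowed (c : Char) : c ∈ pvAllowed.toList ↔ pvInClass c = true := by
  have h : pvAllowed.toList = ['a','b','c','d','e','f','g','h','i','j','k','l','m','n','o','p','q','r','s','t','u','v','w','x','y','z','A','B','C','D','E','F','G','H','I','J','K','L','M','N','O','P','Q','R','S','T','U','V','W','X','Y','Z','0','1','2','3','4','5','6','7','8','9','_','.'] := rfl
  simp only [h, List.mem_cons, List.not_mem_nil, or_false, pvInClass,
    Bool.or_eq_true, Bool.and_eq_true, decide_eq_true_eq, beq_iff_eq, char_eq_iff_toNat,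
    Char.reduceToNat]
  omega

theorem foldl_inv (cs : List Char) (s : String) (n : Int) :
    cs.foldl (fun (st : String × Int) i =>
      if i ∈ pvAllowed.toList then (st.1.push i, st.2) else (st.1.push '_', st.2 + 1)) (s, n)
    = (s ++ String.ofList (cs.map (fun c => if pvInClass c then c else '_')),
       n + Int.ofNat (cs.countP (fun c => !pvInClass c))) := by
  induction cs generalizing s n with
  | nil =>
    simp only [List.foldl_nil, List.map_nil, List.countP_nil]
    refine Prod.ext ?_ (by simp)
    exact (String.toList_injective (by simp)).symm
  | cons c cs ih =>
    simp only [List.foldl_cons, List.map_cons, List.countP_cons]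
    by_cases h : pvInClass c = true
    · rw [if_pos ((mem_allowed c).mpr h), ih, if_pos h]
      refine Prod.ext ?_ (by simp [h])
      exact String.toList_injective (by simp)
    · rw [if_neg (fun hm => h ((mem_allowed c).mp hm)), ih, if_neg h]
      refine Prod.ext ?_ ?_
      · exact String.toList_injective (by simp)
      · simp only [Bool.not_eq_true] at h
        simp [h]
        omega

-- ===== VERDICT (by name: the statement is the Claim_ definition above) =====
theorem normalize_id_py_spec : Claim_equal_normalize_id_py := by
  intro id _
  unfold Spec_normalize_id_py normalize_id_py normalize_id_py_alt
  rw [foldl_inv]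
  refine Prod.ext ?_ (by simp)
  exact String.toList_injective (by simp)
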